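-- pv_equiv track=rewrite | github.com/KodingForKittehs/AdventOfCode-2025 | src/work_area.py | generate_secret
-- ===== SOURCE A (Python) =====
-- def mix(a, secret):
--     return a ^ secret
--
-- def prune(secret):
--     return secret % 16777216
--
-- def generate_secret(secret, n):
--     r1 = secret
--     for i in range(n):
--         r1 = mix(r1 * 64, r1)
--         r1 = prune(r1)
--
--         r1 = mix(r1 // 32, r1)
--         r1 = prune(r1)
--
--         r1 = mix(r1 * 2048, r1)
--         r1 = prune(r1)
--     return r1
-- ===== SOURCE B (Python) =====
-- P = 1 << 24
--
--
-- def _step(x):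
--     x = ((x << 6) ^ x) % P
--     x = ((x >> 5) ^ x) % P
--     x = ((x << 11) ^ x) % P
--     return x
--
--
-- def _apply(cols, x):
--     r = 0
--     for i in range(24):
--         if (x >> i) & 1:
--             r ^= cols[i]
--     return r
--
--
-- def _compose(f, g):
--     return [_apply(f, c) for c in g]
--
--
-- def generate_secret(secret, n):
--     if n <= 0:
--         return secret
--     s = _step(secret)  # one step normalises any int into the 24-bit state space
--     m = [_step(1 << i) for i in range(24)]      # matrix of the GF(2)-linear step
--     r = [1 << i for i in range(24)]             # identity matrix
--     k = n - 1
--     while k: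
--         if k & 1:
--             r = _compose(m, r)
--         m = _compose(m, m)
--         k >>= 1
--     return _apply(r, s)
-- ===== Notes on version B (the rewrite author's own statement) =====
-- stated objective: faster
-- what changed: B replaces A's n-fold iteration of the mix/prune step by exponentiation-by-squaring of the step's 24x24 GF(2) transition matrix (the step is linear over GF(2) on the 24-bit state), applying one plain step first to bring an arbitrary int into the 24-bit state space.
import Mathlib
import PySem

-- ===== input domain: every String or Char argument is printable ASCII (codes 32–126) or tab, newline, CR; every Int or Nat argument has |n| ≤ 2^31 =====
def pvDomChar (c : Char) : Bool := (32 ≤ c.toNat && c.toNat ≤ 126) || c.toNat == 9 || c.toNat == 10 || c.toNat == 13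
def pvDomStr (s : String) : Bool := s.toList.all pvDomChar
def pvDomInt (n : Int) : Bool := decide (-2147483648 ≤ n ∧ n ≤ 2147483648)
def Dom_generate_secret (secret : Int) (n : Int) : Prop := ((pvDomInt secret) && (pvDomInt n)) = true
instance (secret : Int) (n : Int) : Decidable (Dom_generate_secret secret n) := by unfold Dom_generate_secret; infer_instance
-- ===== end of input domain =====

-- B replaces A's n-fold iteration of the bit-mixing step by exponentiation of the step's
-- GF(2) transition matrix by squaring (the step is linear over GF(2) on the 24-bit state).

-- ===== PORT A =====
def mix (a : Int) (secret : Int) : Int := PySem.Int.bxor a secret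

def prune (secret : Int) : Int := PySem.Int.mod secret 16777216

def generate_secret (secret : Int) (n : Int) : Int :=
  (PySem.List.pyRange 0 n 1).foldl (fun r1 _ =>
    let r1 := prune (mix (r1 * 64) r1)
    let r1 := prune (mix (PySem.Int.floordiv r1 32) r1)
    prune (mix (r1 * 2048) r1)) secret

-- ===== PORT B =====
-- P = 1 << 24
def bP : Int := 1 <<< (24 : Nat)

-- _step: one PRNG step, written with shifts
def bstep (x : Int) : Int :=
  let x1 := PySem.Int.mod (PySem.Int.bxor (x <<< (6 : Nat)) x) bP
  let x2 := PySem.Int.mod (PySem.Int.bxor (x1 >>> (5 : Nat)) x1) bP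
  PySem.Int.mod (PySem.Int.bxor (x2 <<< (11 : Nat)) x2) bP

-- _apply: image of the 24-bit vector x under the matrix given by its columns
-- (i ranges over [0, 24), so i.toNat is exact and cols[i] is always in range:
--  pyGetD's default is unreachable for the 24-column matrices B builds)
def bapply (cols : List Int) (x : Int) : Int :=
  (PySem.List.pyRange 0 24 1).foldl
    (fun r i => if PySem.Int.band (x >>> i.toNat) 1 ≠ 0 then PySem.Int.bxor r (PySem.List.pyGetD cols i 0) else r) 0

-- _compose: columns of f∘g
def bcompose (f : List Int) (g : List Int) : List Int := g.map (fun c => bapply f c)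

-- the 'while k:' squaring loop; k is always ≥ 0 when reached (k = n-1, n ≥ 1),
-- the '≤ 0' guard only makes the recursion total
def bloop (m : List Int) (r : List Int) (k : Int) : List Int :=
  if k ≤ 0 then r
  else bloop (bcompose m m) (if PySem.Int.band k 1 ≠ 0 then bcompose m r else r) (k >>> (1:Nat))
termination_by k.toNat
decreasing_by rw [Int.shiftRight_eq_div_pow]; omega

def generate_secret_alt (secret : Int) (n : Int) : Int :=
  if n ≤ 0 then secret
  else
    let s := bstep secret
    let m := (PySem.List.pyRange 0 24 1).map (fun i => bstep (1 <<< i.toNat))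
    let r := (PySem.List.pyRange 0 24 1).map (fun i => ((1 <<< i.toNat : Nat) : Int))
    bapply (bloop m r (n - 1)) s

-- ===== PRECONDITION & SPEC =====
def Spec_generate_secret (secret : Int) (n : Int) (out : Int) : Prop := out = generate_secret_alt secret n
instance (secret : Int) (n : Int) (out : Int) : Decidable (Spec_generate_secret secret n out) := by unfold Spec_generate_secret; infer_instance

-- ===== CLAIM (what is proved, stated in full; the proofs are below) =====
def Claim_equal_generate_secret : Prop := ∀ (secret : Int) (n : Int), Dom_generate_secret secret n → Spec_generate_secret secret n (generate_secret secret n)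

-- ===== LEMMAS AND PROOFS =====

-- Nat-level shadow of B's machinery (all values B manipulates after its first step
-- are nonnegative; the mathematics lives here)
def stepN (x : Nat) : Nat :=
  let a := ((x <<< 6) ^^^ x) % 16777216
  let b := ((a >>> 5) ^^^ a) % 16777216
  ((b <<< 11) ^^^ b) % 16777216

def applyN (cols : List Nat) (x : Nat) : Nat :=
  (List.range 24).foldl (fun r i => if x.testBit i then r ^^^ cols.getD i 0 else r) 0

def composeN (f : List Nat) (g : List Nat) : List Nat := g.map (applyN f)

def loopN (m : List Nat) (r : List Nat) (k : Nat) : List Nat :=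
  if k = 0 then r
  else loopN (composeN m m) (if k % 2 = 1 then composeN m r else r) (k / 2)

-- f is GF(2)-linear and preserves the 24-bit state space
def LinMap (f : Nat → Nat) : Prop :=
  (∀ x y, f (x ^^^ y) = f x ^^^ f y) ∧ f 0 = 0 ∧ ∀ x, x < 16777216 → f x < 16777216

-- cols is the column matrix of f
def RepM (f : Nat → Nat) (cols : List Nat) : Prop :=
  cols.length = 24 ∧ ∀ i, i < 24 → cols.getD i 0 = f (2 ^ i)

theorem xor_sub_left (s : Nat) (u v : Nat) :
    (((u ^^^ v) <<< s) ^^^ (u ^^^ v)) % 2 ^ 24 =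
      (((u <<< s) ^^^ u) % 2 ^ 24) ^^^ (((v <<< s) ^^^ v) % 2 ^ 24) := by
  apply Nat.eq_of_testBit_eq; intro i
  simp only [Nat.testBit_mod_two_pow, Nat.testBit_xor, Nat.testBit_shiftLeft]
  cases decide (i < 24) <;> cases decide (s ≤ i) <;>
    cases u.testBit (i - s) <;> cases v.testBit (i - s) <;>
    cases u.testBit i <;> cases v.testBit i <;> rfl

theorem xor_sub_right (s : Nat) (u v : Nat) :
    (((u ^^^ v) >>> s) ^^^ (u ^^^ v)) % 2 ^ 24 =
      (((u >>> s) ^^^ u) % 2 ^ 24) ^^^ (((v >>> s) ^^^ v) % 2 ^ 24) := by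
  apply Nat.eq_of_testBit_eq; intro i
  simp only [Nat.testBit_mod_two_pow, Nat.testBit_xor, Nat.testBit_shiftRight]
  cases decide (i < 24) <;>
    cases u.testBit (s + i) <;> cases v.testBit (s + i) <;>
    cases u.testBit i <;> cases v.testBit i <;> rfl

theorem stepN_lin : ∀ x y, stepN (x ^^^ y) = stepN x ^^^ stepN y := by
  intro x y
  have e : (16777216 : Nat) = 2 ^ 24 := by norm_num
  simp only [stepN, e, xor_sub_left, xor_sub_right]

theorem stepN_linmap : LinMap stepN := by
  refine ⟨stepN_lin, rfl, fun x _ => ?_⟩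
  simp only [stepN]
  omega

theorem linmap_id : LinMap id := ⟨fun _ _ => rfl, rfl, fun _ h => h⟩

theorem linmap_comp {f g : Nat → Nat} (hf : LinMap f) (hg : LinMap g) : LinMap (f ∘ g) := by
  refine ⟨fun x y => ?_, ?_, fun x h => ?_⟩
  · simp [Function.comp, hg.1, hf.1]
  · simp [Function.comp, hg.2.1, hf.2.1]
  · exact hf.2.2 _ (hg.2.2 _ h)

theorem linmap_iterate {f : Nat → Nat} (hf : LinMap f) (k : Nat) : LinMap f^[k] := by
  induction k with
  | zero => simpa using linmap_id
  | succ k ih =>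
    rw [Function.iterate_succ']
    exact linmap_comp hf ih

theorem mod_pow_succ_xor (x k : Nat) :
    x % 2 ^ (k + 1) = (x % 2 ^ k) ^^^ (if x.testBit k then 2 ^ k else 0) := by
  apply Nat.eq_of_testBit_eq; intro i
  rcases lt_trichotomy i k with h|h|h
  · cases hk : x.testBit k <;>
      simp [Nat.testBit_mod_two_pow, Nat.testBit_two_pow_of_ne (by omega : k ≠ i),
        h, Nat.lt_succ_of_lt h]
  · subst h
    cases hk : x.testBit i <;>
      simp [hk, Nat.testBit_mod_two_pow, Nat.testBit_two_pow_self]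
  · cases hk : x.testBit k <;>
      simp [Nat.testBit_mod_two_pow, Nat.testBit_two_pow_of_ne (by omega : k ≠ i),
        Nat.not_lt.mpr h.le, show ¬ i ≤ k by omega]

theorem applyN_inv {f : Nat → Nat} {cols : List Nat} (hf : LinMap f) (hr : RepM f cols)
    (x : Nat) : ∀ k, k ≤ 24 →
      (List.range k).foldl (fun r i => if x.testBit i then r ^^^ cols.getD i 0 else r) 0 =
        f (x % 2 ^ k) := by
  intro k
  induction k with
  | zero => intro _; simp [Nat.mod_one, hf.2.1]
  | succ k ih =>
    intro hk
    rw [List.range_succ, List.foldl_append, ih (by omega), mod_pow_succ_xor]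
    cases hb : x.testBit k <;>
      simp [hb, hf.1, ← hr.2 k (by omega), List.getD]

theorem applyN_spec {f : Nat → Nat} {cols : List Nat} (hf : LinMap f) (hr : RepM f cols)
    {x : Nat} (hx : x < 16777216) : applyN cols x = f x := by
  have h := applyN_inv hf hr x 24 le_rfl
  rwa [Nat.mod_eq_of_lt (by norm_num at hx ⊢; omega)] at h

theorem composeN_rep {f g : Nat → Nat} {F G : List Nat} (hf : LinMap f) (hF : RepM f F)
    (hg : LinMap g) (hG : RepM g G) : RepM (f ∘ g) (composeN F G) := by
  refine ⟨by simp [composeN, hG.1], fun i hi => ?_⟩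
  have hlen : i < G.length := by rw [hG.1]; omega
  rw [composeN, List.getD_eq_getElem _ _ (by simpa using hlen), List.getElem_map,
    ← List.getD_eq_getElem G 0 hlen, hG.2 i hi]
  have h2 : (2 : Nat) ^ i < 16777216 := by
    calc (2:Nat) ^ i < 2 ^ 24 := Nat.pow_lt_pow_right (by norm_num) hi
    _ = 16777216 := by norm_num
  exact applyN_spec hf hF (hg.2.2 _ h2)

theorem repM_congr {f g : Nat → Nat} {cols : List Nat} (h : ∀ x, f x = g x) (hf : RepM f cols) :
    RepM g cols := ⟨hf.1, fun i hi => by rw [hf.2 i hi, h]⟩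

theorem loopN_spec :
    ∀ k {f g : Nat → Nat} {M R : List Nat}, LinMap f → RepM f M → LinMap g → RepM g R →
      RepM (f^[k] ∘ g) (loopN M R k) := by
  intro k
  induction k using Nat.strong_induction_on with
  | _ k ih =>
    intro f g M R hf hM hg hR
    rw [loopN]
    by_cases hk : k = 0
    · subst hk; simpa using hR
    · rw [if_neg hk]
      have hff : LinMap (f ∘ f) := linmap_comp hf hf
      have hMM : RepM (f ∘ f) (composeN M M) := composeN_rep hf hM hf hM
      have e2 : ∀ m y, (f ∘ f)^[m] y = f^[2 * m] y := by
        intro m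
        induction m with
        | zero => simp
        | succ m ihm =>
          intro y
          rw [Function.iterate_succ_apply, ihm, show 2 * (m + 1) = 2 * m + 1 + 1 by ring,
            Function.iterate_succ_apply, Function.iterate_succ_apply]
          rfl
      by_cases ho : k % 2 = 1
      · rw [if_pos ho]
        have hrec := ih (k / 2) (by omega) hff hMM (linmap_comp hf hg) (composeN_rep hf hM hg hR)
        refine repM_congr (fun x => ?_) hrec
        simp only [Function.comp_apply]
        calc ((f ∘ f)^[k / 2] ∘ f ∘ g) x = (f ∘ f)^[k / 2] (f (g x)) := rfl
          _ = f^[2 * (k / 2)] (f (g x)) := e2 _ _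
          _ = f^[2 * (k / 2) + 1] (g x) := (Function.iterate_succ_apply f (2 * (k / 2)) (g x)).symm
          _ = (f^[k] ∘ g) x := by rw [show 2 * (k / 2) + 1 = k by omega]; rfl
      · rw [if_neg ho]
        have hrec := ih (k / 2) (by omega) hff hMM hg hR
        refine repM_congr (fun x => ?_) hrec
        simp only [Function.comp_apply]
        calc ((f ∘ f)^[k / 2] ∘ g) x = (f ∘ f)^[k / 2] (g x) := rfl
          _ = f^[2 * (k / 2)] (g x) := e2 _ _
          _ = (f^[k] ∘ g) x := by rw [show 2 * (k / 2) = k by omega]; rfl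

-- bridges between B's Int port and the Nat shadow
theorem cast_shiftLeft (x s : Nat) : ((x : Int) <<< s) = ((x <<< s : Nat) : Int) := by
  simp [Int.shiftLeft_eq, Nat.shiftLeft_eq]

theorem cast_shiftRight (x s : Nat) : ((x : Int) >>> s) = ((x >>> s : Nat) : Int) := by
  simp [Int.shiftRight_eq_div_pow, Nat.shiftRight_eq_div_pow]

theorem cast_getD (cols : List Nat) (i : Nat) :
    ((List.map (fun (c : Nat) => (c : Int)) cols).getD i 0) = ((cols.getD i 0 : Nat) : Int) := by
  have h := List.getD_map (l := cols) (n := i) (d := 0) (fun (c : Nat) => (c : Int))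
  rwa [Nat.cast_zero] at h

theorem bit_cast (x i : Nat) :
    (PySem.Int.band ((x : Int) >>> ((i : Int)).toNat) 1 ≠ 0) ↔ x.testBit i := by
  rw [show ((i : Int)).toNat = i by simp, cast_shiftRight,
    show (1 : Int) = ((1 : Nat) : Int) from rfl, PySem.Int.band_natCast]
  simp only [ne_eq, Nat.cast_eq_zero]
  simp [Nat.testBit, Nat.and_one_is_mod, Nat.shiftRight_eq_div_pow, Nat.one_and_eq_mod_two]

theorem step_cast (cols : List Nat) (x r i : Nat) :
    (if PySem.Int.band ((x : Int) >>> ((i : Int)).toNat) 1 ≠ 0 then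
        PySem.Int.bxor (r : Int) (PySem.List.pyGetD (List.map (fun (c : Nat) => (c : Int)) cols) (i : Int) 0)
      else (r : Int))
    = ((if x.testBit i then r ^^^ cols.getD i 0 else r : Nat) : Int) := by
  rw [PySem.List.pyGetD_natCast, cast_getD]
  by_cases hb : x.testBit i
  · rw [if_pos ((bit_cast x i).mpr hb), if_pos hb, PySem.Int.bxor_natCast]
  · rw [if_neg (fun hc => hb ((bit_cast x i).mp hc)), if_neg hb]

theorem bP_eq : bP = ((16777216 : Nat) : Int) := by norm_num [bP, Int.shiftLeft_eq]

theorem bstep_cast (x : Nat) : bstep (x : Int) = ((stepN x : Nat) : Int) := by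
  rw [bstep, stepN, bP_eq]
  rw [cast_shiftLeft, PySem.Int.bxor_natCast, PySem.Int.mod_natCast,
    cast_shiftRight, PySem.Int.bxor_natCast, PySem.Int.mod_natCast,
    cast_shiftLeft, PySem.Int.bxor_natCast, PySem.Int.mod_natCast]

theorem bapply_cast (cols : List Nat) (x : Nat) :
    bapply (List.map (fun (c : Nat) => (c : Int)) cols) (x : Int) = ((applyN cols x : Nat) : Int) := by
  rw [bapply, applyN, show (24 : Int) = ((24 : Nat) : Int) from rfl, PySem.List.pyRange_zero_nat,
    List.foldl_map]
  have key : ∀ (l : List Nat) (acc : Nat),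
      l.foldl (fun (r : Int) (i : Nat) =>
        if PySem.Int.band ((x : Int) >>> ((i : Int)).toNat) 1 ≠ 0 then
          PySem.Int.bxor r (PySem.List.pyGetD (List.map (fun (c : Nat) => (c : Int)) cols) (i : Int) 0)
        else r) (acc : Int)
      = ((l.foldl (fun r i => if x.testBit i then r ^^^ cols.getD i 0 else r) acc : Nat) : Int) := by
    intro l
    induction l with
    | nil => intro _; rfl
    | cons a t ih =>
      intro acc
      simp only [List.foldl_cons]
      rw [step_cast, ih]
  exact key (List.range 24) 0

theorem bcompose_cast (F G : List Nat) :
    bcompose (List.map (fun (c : Nat) => (c : Int)) F) (List.map (fun (c : Nat) => (c : Int)) G) =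
      List.map (fun (c : Nat) => (c : Int)) (composeN F G) := by
  rw [bcompose, composeN, List.map_map, List.map_map]
  apply List.map_congr_left
  intro c _
  exact bapply_cast F c

theorem bloop_cast_aux : ∀ (kn : Nat) (M R : List Nat) (k : Int), 0 ≤ k → k.toNat = kn →
    bloop (List.map (fun (c : Nat) => (c : Int)) M) (List.map (fun (c : Nat) => (c : Int)) R) k =
      List.map (fun (c : Nat) => (c : Int)) (loopN M R kn) := by
  intro kn
  induction kn using Nat.strong_induction_on with
  | _ kn ih =>
    intro M R k hk hkn
    rw [bloop, loopN]
    by_cases h0 : k ≤ 0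
    · rw [if_pos h0, if_pos (show kn = 0 by omega)]
    · rw [if_neg h0, if_neg (show ¬ kn = 0 by omega)]
      have hsh : (k >>> (1 : Nat)) = ((kn / 2 : Nat) : Int) := by
        rw [Int.shiftRight_eq_div_pow]; omega
      have hband : (PySem.Int.band k 1 ≠ 0) ↔ kn % 2 = 1 := by
        rw [PySem.Int.band_one, PySem.Int.mod_eq_emod_of_pos (by norm_num)]
        constructor <;> intro h <;> omega
      by_cases ho : kn % 2 = 1
      · rw [if_pos (hband.mpr ho), if_pos ho, bcompose_cast, bcompose_cast, hsh,
          ih (kn / 2) (by omega) _ _ _ (by positivity) (by omega)]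
      · rw [if_neg (fun hc => ho (hband.mp hc)), if_neg ho, bcompose_cast, hsh,
          ih (kn / 2) (by omega) _ _ _ (by positivity) (by omega)]

theorem bloop_cast (M R : List Nat) (k : Int) (hk : 0 ≤ k) :
    bloop (List.map (fun (c : Nat) => (c : Int)) M) (List.map (fun (c : Nat) => (c : Int)) R) k =
      List.map (fun (c : Nat) => (c : Int)) (loopN M R k.toNat) :=
  bloop_cast_aux k.toNat M R k hk rfl

-- A's loop body equals B's step on every Int (shifts = mul/floordiv)
theorem astep_eq_bstep (r : Int) :
    (let r1 := prune (mix (r * 64) r)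
     let r1 := prune (mix (PySem.Int.floordiv r1 32) r1)
     prune (mix (r1 * 2048) r1)) = bstep r := by
  show prune (mix _ _) = _
  rw [bstep, bP_eq]
  rw [show ∀ a : Int, a <<< (6 : Nat) = a * 64 by intro a; simp [Int.shiftLeft_eq],
    show ∀ a : Int, a <<< (11 : Nat) = a * 2048 by intro a; simp [Int.shiftLeft_eq],
    show ∀ a : Int, a >>> (5 : Nat) = PySem.Int.floordiv a 32 by
      intro a
      rw [PySem.Int.floordiv_eq_ediv_of_pos (by norm_num)]
      simp [Int.shiftRight_eq_div_pow]]
  rfl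

theorem bstep_bounds (r : Int) : 0 ≤ bstep r ∧ bstep r < 16777216 := by
  rw [bstep, bP_eq]
  exact ⟨PySem.Int.mod_nonneg (b := ((16777216 : Nat) : Int)) _ (by norm_num),
    PySem.Int.mod_lt (b := ((16777216 : Nat) : Int)) _ (by norm_num)⟩

theorem foldl_const_iterate {α β : Type} (l : List α) (f : β → β) (i : β) :
    l.foldl (fun r _ => f r) i = f^[l.length] i := by
  induction l generalizing i with
  | nil => rfl
  | cons a t ih => simp [ih, Function.iterate_succ_apply]

theorem astep_cast_iterate (m : Nat) (x : Nat) :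
    (fun r1 : Int =>
        let r1 := prune (mix (r1 * 64) r1)
        let r1 := prune (mix (PySem.Int.floordiv r1 32) r1)
        prune (mix (r1 * 2048) r1))^[m] ((x : Nat) : Int) = ((stepN^[m] x : Nat) : Int) := by
  induction m generalizing x with
  | zero => rfl
  | succ m ih =>
    rw [Function.iterate_succ_apply, Function.iterate_succ_apply, astep_eq_bstep, bstep_cast]
    exact ih (stepN x)

-- the two 24-column matrices B starts from, on the Nat side
def MN : List Nat := (List.range 24).map (fun i => stepN (1 <<< i))
def RN : List Nat := (List.range 24).map (fun i => 1 <<< i)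

theorem repM_MN : RepM stepN MN := by
  refine ⟨by simp [MN], fun i hi => ?_⟩
  rw [MN, List.getD_eq_getElem _ _ (by simpa using hi)]
  simp [Nat.one_shiftLeft]

theorem repM_RN : RepM id RN := by
  refine ⟨by simp [RN], fun i hi => ?_⟩
  rw [RN, List.getD_eq_getElem _ _ (by simpa using hi)]
  simp [Nat.one_shiftLeft]

theorem mlist_eq : (PySem.List.pyRange 0 24 1).map (fun i => bstep (1 <<< i.toNat)) =
    List.map (fun (c : Nat) => (c : Int)) MN := by
  rw [show (24 : Int) = ((24 : Nat) : Int) from rfl, PySem.List.pyRange_zero_nat, MN,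
    List.map_map, List.map_map]
  apply List.map_congr_left
  intro i _
  simp only [Function.comp_apply]
  rw [show ((i : Int)).toNat = i by simp, bstep_cast]

theorem rlist_eq : (PySem.List.pyRange 0 24 1).map (fun i => ((1 <<< i.toNat : Nat) : Int)) =
    List.map (fun (c : Nat) => (c : Int)) RN := by
  rw [show (24 : Int) = ((24 : Nat) : Int) from rfl, PySem.List.pyRange_zero_nat, RN,
    List.map_map, List.map_map]
  apply List.map_congr_left
  intro i _
  simp only [Function.comp_apply]
  rw [show ((i : Int)).toNat = i by simp]

theorem alt_pos (secret n : Int) (hn : ¬ n ≤ 0) :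
    generate_secret_alt secret n =
      ((applyN (loopN MN RN (n - 1).toNat) (bstep secret).toNat : Nat) : Int) := by
  simp only [generate_secret_alt, if_neg hn]
  rw [mlist_eq, rlist_eq, bloop_cast _ _ _ (by omega),
    show bstep secret = (((bstep secret).toNat : Nat) : Int) by
      have := bstep_bounds secret; omega,
    bapply_cast, Int.toNat_natCast]

-- ===== VERDICT (by name: the statement is the Claim_ definition above) =====
theorem generate_secret_spec : Claim_equal_generate_secret := by
  intro secret n _
  unfold Spec_generate_secret
  by_cases hn : n ≤ 0
  · rw [generate_secret, generate_secret_alt, if_pos hn,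
      PySem.List.pyRange_one_eq_nil hn, List.foldl_nil]
  · rw [generate_secret, alt_pos secret n hn, foldl_const_iterate, PySem.List.length_pyRange_one,
      show (n - 0).toNat = (n - 1).toNat + 1 by omega,
      Function.iterate_succ_apply, astep_eq_bstep,
      show bstep secret = (((bstep secret).toNat : Nat) : Int) by
        have := bstep_bounds secret; omega,
      astep_cast_iterate]
    simp only [Int.toNat_natCast]
    have hrep := loopN_spec (n - 1).toNat stepN_linmap repM_MN linmap_id repM_RN
    have hlin : LinMap (stepN^[(n - 1).toNat] ∘ id) :=
      linmap_comp (linmap_iterate stepN_linmap _) linmap_id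
    have hu : (bstep secret).toNat < 16777216 := by
      have := bstep_bounds secret; omega
    rw [applyN_spec hlin hrep hu]
    rfl
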